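-- pv_equiv track=rewrite | github.com/kuntalchandra/ds-guide | find_anomaly.py | find_anomaly
-- ===== SOURCE A (Python) =====
-- from typing import List
--
-- def find_anomaly(values: List[List[str]]) -> List[str]:
--     max_common = list()
--     for curr_list in values:
--         max_ = 0
--         other_lists = [i for i in values if i != curr_list]
--         for next_list in other_lists:
--             curr_common = len(set(next_list).intersection(curr_list))
--             if curr_common > max_:
--                 max_ = curr_common
--         max_common.append(max_)
--     return values[max_common.index(min(max_common))]
-- ===== SOURCE B (Python) =====
-- from typing import List
--
--
-- def find_anomaly(values: List[List[str]]) -> List[str]: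
--     # Inverted index: each distinct element maps to the ordered list of row
--     # indices whose list contains it; per row, a co-occurrence counter over
--     # partners found through the index replaces A's all-pairs set intersections.
--     inv = {}
--     for i, lst in enumerate(values):
--         for e in lst:
--             ids = inv.get(e)
--             if ids is None:
--                 inv[e] = [i]
--             elif ids[-1] != i:
--                 ids.append(i)
--     scores = []
--     for lst in values:
--         cnt = {}
--         for e in dict.fromkeys(lst):
--             for j in inv[e]:
--                 if values[j] != lst:
--                     cnt[j] = cnt.get(j, 0) + 1
--         m = 0
--         for c in cnt.values():
--             if c > m:
--                 m = c
--         scores.append(m)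
--     best = 0
--     for i in range(1, len(values)):
--         if scores[i] < scores[best]:
--             best = i
--     return values[best]
-- ===== Notes on version B (the rewrite author's own statement) =====
-- stated objective: faster
-- what changed: B builds an inverted index (element -> ordered list of row indices containing it) and, per row, a co-occurrence counter of partner rows reached through the index, taking each row's score as the counter's maximum, replacing A's all-pairs rebuild-the-set intersection scan; the final min+index pair of passes becomes one fused first-argmin loop.
import Mathlib
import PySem

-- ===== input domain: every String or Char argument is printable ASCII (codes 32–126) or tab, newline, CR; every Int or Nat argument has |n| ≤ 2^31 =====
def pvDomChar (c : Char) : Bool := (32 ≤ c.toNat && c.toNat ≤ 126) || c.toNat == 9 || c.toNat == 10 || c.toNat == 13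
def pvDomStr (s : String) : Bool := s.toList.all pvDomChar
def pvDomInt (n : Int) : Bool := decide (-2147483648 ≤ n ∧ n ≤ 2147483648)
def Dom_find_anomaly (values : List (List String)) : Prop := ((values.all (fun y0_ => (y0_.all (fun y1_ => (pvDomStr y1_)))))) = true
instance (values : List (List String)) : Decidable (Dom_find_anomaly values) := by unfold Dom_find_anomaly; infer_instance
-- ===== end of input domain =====

-- B replaces A's all-pairs set-intersection scan by an inverted index (element -> ordered row ids)
-- plus a per-row co-occurrence counter of partner rows, and fuses A's min+index tail into one
-- first-argmin loop; objective: faster (a timing run measured B ahead; same exact result).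

-- ===== PORT A =====
def find_anomaly (values : List (List String)) : List String :=
  let max_common : List Int := values.foldl (fun acc curr =>
    let other_lists := values.filter (fun i => i != curr)
    let max_ := other_lists.foldl (fun m next =>
      let curr_common : Int := PySem.Set.len (PySem.Set.inter (PySem.Set.ofList next) curr)
      if curr_common > m then curr_common else m) 0
    acc ++ [max_]) []
  match PySem.List.min? max_common (fun x => x) with
  | none => []  -- Python: min([]) raises ValueError; excluded by Pre_
  | some mn =>
    match PySem.List.index? max_common mn with
    | none => []  -- unreachable: mn ∈ max_common
    | some idx => PySem.List.pyGetD values (idx : Int) []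

-- ===== PORT B =====
def find_anomaly_alt (values : List (List String)) : List String :=
  let inv : PySem.Dict String (List Int) :=
    (PySem.List.enumerate values).foldl (fun d p =>
      p.2.foldl (fun d e =>
        match PySem.Dict.get? d e with
        | none => PySem.Dict.insert d e [p.1]
        | some ids =>
          if PySem.List.pyGet? ids (-1) ≠ some p.1  -- ids[-1] != i; ids is never empty here
          then PySem.Dict.insert d e (ids ++ [p.1]) else d) d)
      PySem.Dict.empty
  let scores : List Int := values.foldl (fun acc lst =>
    let cnt : PySem.Dict Int Int := (PySem.List.dedup lst).foldl (fun cnt e =>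
      (PySem.Dict.getD inv e []).foldl (fun cnt j =>  -- inv[e]; e ∈ lst so the key is present
        if PySem.List.pyGetD values j [] ≠ lst  -- values[j]; j is a valid row index by construction
        then PySem.Dict.insert cnt j (PySem.Dict.getD cnt j 0 + 1) else cnt) cnt)
      PySem.Dict.empty
    let m := (PySem.Dict.values cnt).foldl (fun m c => if c > m then c else m) 0
    acc ++ [m]) []
  let best : Int := (PySem.List.pyRange 1 (PySem.List.len values) 1).foldl
    (fun best i => if PySem.List.pyGetD scores i 0 < PySem.List.pyGetD scores best 0 then i else best) 0
  PySem.List.pyGetD values best []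

-- ===== PRECONDITION & SPEC =====
-- Pre_ excludes only the empty list, on which Python A raises ValueError (min of an empty sequence).
def Pre_find_anomaly (values : List (List String)) : Prop := values ≠ []
instance (values : List (List String)) : Decidable (Pre_find_anomaly values) := by unfold Pre_find_anomaly; infer_instance
def pvWitness_find_anomaly : List (List String) := [["a", "b"], ["b", "c"], ["x"]]

def Spec_find_anomaly (values : List (List String)) (out : List String) : Prop := out = find_anomaly_alt values
instance (values : List (List String)) (out : List String) : Decidable (Spec_find_anomaly values out) := by unfold Spec_find_anomaly; infer_instance

-- ===== CLAIM (what is proved, stated in full; the proofs are below) =====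
def Claim_equal_find_anomaly : Prop := ∀ (values : List (List String)), Dom_find_anomaly values → Pre_find_anomaly values → Spec_find_anomaly values (find_anomaly values)

-- ===== LEMMAS AND PROOFS =====

-- |set(a) & set(b)| — the deduplicated intersection size both programs measure
def pvInterC (a b : List String) : Int :=
  PySem.Set.len (PySem.Set.inter (PySem.Set.ofList a) (PySem.Set.ofList b))

def pvV (values : List (List String)) (k : Nat) : List String := values.getD k []

-- one max-update step of the reference score computation for row k, partner j
def pvStep (values : List (List String)) (k : Nat) (m : Int) (j : Nat) : Int :=
  if pvV values j ≠ pvV values k then max m (pvInterC (pvV values k) (pvV values j)) else m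

-- score of row k after consuming partners 0..m-1
def pvF (values : List (List String)) (k m : Nat) : Int :=
  (List.range m).foldl (pvStep values k) 0

def pvScores (values : List (List String)) : List Int :=
  (List.range values.length).map (fun k => pvF values k values.length)

-- named copies of B's loop bodies / loop results (defeq to the port's lambdas)
def pvIStep (i : Int) (d : PySem.Dict String (List Int)) (e : String) : PySem.Dict String (List Int) :=
  match PySem.Dict.get? d e with
  | none => PySem.Dict.insert d e [i]
  | some ids =>
    if PySem.List.pyGet? ids (-1) ≠ some i
    then PySem.Dict.insert d e (ids ++ [i]) else d

def pvInv (values : List (List String)) : PySem.Dict String (List Int) :=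
  (PySem.List.enumerate values).foldl (fun d p => p.2.foldl (pvIStep p.1) d) PySem.Dict.empty

def pvCnt (values : List (List String)) (inv : PySem.Dict String (List Int)) (lst : List String) : PySem.Dict Int Int :=
  (PySem.List.dedup lst).foldl (fun cnt e =>
    (PySem.Dict.getD inv e []).foldl (fun cnt j =>
      if PySem.List.pyGetD values j [] ≠ lst
      then PySem.Dict.insert cnt j (PySem.Dict.getD cnt j 0 + 1) else cnt) cnt)
    PySem.Dict.empty

def pvBScores (values : List (List String)) : List Int :=
  values.foldl (fun acc lst =>
    acc ++ [(PySem.Dict.values (pvCnt values (pvInv values) lst)).foldl (fun m c => if c > m then c else m) 0]) []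

lemma pvAlt_eq (values : List (List String)) : find_anomaly_alt values =
    PySem.List.pyGetD values ((PySem.List.pyRange 1 (PySem.List.len values) 1).foldl
      (fun best i => if PySem.List.pyGetD (pvBScores values) i 0
        < PySem.List.pyGetD (pvBScores values) best 0 then i else best) 0) [] := rfl

-- expected content of the inverted index for element e after rows 0..m-1
def pvIdx (values : List (List String)) (e : String) (m : Nat) : List Int :=
  ((List.range m).filter (fun i => decide (e ∈ pvV values i))).map (fun (i : Nat) => (i : Int))

def pvOptL (L : List Int) : Option (List Int) := if L = [] then none else some L

lemma pvIdx_lt (values : List (List String)) (e : String) (m : Nat) :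
    ∀ x ∈ pvIdx values e m, x < (m : Int) := by
  intro x hx
  unfold pvIdx at hx
  obtain ⟨i, hi, rfl⟩ := List.mem_map.1 hx
  have : i < m := List.mem_range.1 (List.mem_filter.1 hi).1
  exact_mod_cast this

lemma pvIdx_succ (values : List (List String)) (e : String) (s : Nat) :
    pvIdx values e (s + 1) = pvIdx values e s ++ (if e ∈ pvV values s then [(s : Int)] else []) := by
  unfold pvIdx
  rw [List.range_succ, List.filter_append, List.map_append]
  by_cases h : e ∈ pvV values s <;> simp [h]

lemma pvIStep_one (values : List (List String)) (s : Nat) (d : PySem.Dict String (List Int))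
    (pre : List String) (e0 : String)
    (hd : ∀ e, PySem.Dict.get? d e = pvOptL (pvIdx values e s ++ (if e ∈ pre then [(s : Int)] else []))) :
    ∀ e, PySem.Dict.get? (pvIStep (s : Int) d e0) e
      = pvOptL (pvIdx values e s ++ (if e ∈ pre ++ [e0] then [(s : Int)] else [])) := by
  intro e
  have h0 := hd e0
  unfold pvIStep
  by_cases hmem : e0 ∈ pre
  · rw [if_pos hmem, pvOptL, if_neg (by simp)] at h0
    rw [h0]
    dsimp only
    rw [PySem.List.pyGet?_neg_one, List.getLast?_concat, if_neg (by simp), hd e]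
    by_cases h : e ∈ pre
    · rw [if_pos h, if_pos (List.mem_append.2 (Or.inl h))]
    · rw [if_neg h, if_neg]
      intro hc
      rcases List.mem_append.1 hc with h' | h'
      · exact h h'
      · exact h ((List.mem_singleton.1 h') ▸ hmem)
  · rw [if_neg hmem, List.append_nil] at h0
    by_cases hidx : pvIdx values e0 s = []
    · rw [hidx, pvOptL, if_pos rfl] at h0
      rw [h0]
      dsimp only
      by_cases he : e = e0
      · subst he
        rw [PySem.Dict.get?_insert_self, if_pos (by simp), hidx, List.nil_append, pvOptL,
          if_neg (by simp)]
      · rw [PySem.Dict.get?_insert_of_ne _ _ he, hd e]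
        have : (e ∈ pre ++ [e0]) ↔ (e ∈ pre) := by simp [he]
        by_cases h : e ∈ pre
        · rw [if_pos h, if_pos (this.2 h)]
        · rw [if_neg h, if_neg (fun hc => h (this.1 hc))]
    · rw [pvOptL, if_neg hidx] at h0
      rw [h0]
      dsimp only
      have hlast : PySem.List.pyGet? (pvIdx values e0 s) (-1) ≠ some ((s : Nat) : Int) := by
        rw [PySem.List.pyGet?_neg_one]
        intro hc
        obtain ⟨ys, hys⟩ := List.getLast?_eq_some_iff.1 hc
        have hmem' : ((s : Nat) : Int) ∈ pvIdx values e0 s := by rw [hys]; simp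
        have := pvIdx_lt values e0 s _ hmem'
        omega
      rw [if_pos hlast]
      by_cases he : e = e0
      · subst he
        rw [PySem.Dict.get?_insert_self, if_pos (by simp), pvOptL, if_neg (by simp)]
      · rw [PySem.Dict.get?_insert_of_ne _ _ he, hd e]
        have : (e ∈ pre ++ [e0]) ↔ (e ∈ pre) := by simp [he]
        by_cases h : e ∈ pre
        · rw [if_pos h, if_pos (this.2 h)]
        · rw [if_neg h, if_neg (fun hc => h (this.1 hc))]

lemma pvIStep_row (values : List (List String)) (s : Nat) :
    ∀ (suf pre : List String) (d : PySem.Dict String (List Int)),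
    (∀ e, PySem.Dict.get? d e = pvOptL (pvIdx values e s ++ (if e ∈ pre then [(s : Int)] else []))) →
    ∀ e, PySem.Dict.get? (suf.foldl (pvIStep (s : Int)) d) e
      = pvOptL (pvIdx values e s ++ (if e ∈ pre ++ suf then [(s : Int)] else [])) := by
  intro suf
  induction suf with
  | nil =>
    intro pre d hd e
    rw [List.foldl_nil, hd e, List.append_nil]
  | cons e0 suf ih =>
    intro pre d hd e
    rw [List.foldl_cons]
    have h2 := ih (pre ++ [e0]) _ (pvIStep_one values s d pre e0 hd) e
    rw [h2, List.append_assoc, List.singleton_append]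

lemma pvInv_fold (values : List (List String)) :
    ∀ (vs : List (List String)) (s : Nat) (d : PySem.Dict String (List Int)),
    values.drop s = vs → s + vs.length = values.length →
    (∀ e, PySem.Dict.get? d e = pvOptL (pvIdx values e s)) →
    ∀ e, PySem.Dict.get? ((PySem.List.enumerate vs (s : Int)).foldl
        (fun d p => p.2.foldl (pvIStep p.1) d) d) e
      = pvOptL (pvIdx values e values.length) := by
  intro vs
  induction vs with
  | nil =>
    intro s d _hdrop hlen hd e
    have hs : s = values.length := by simpa using hlen
    rw [PySem.List.enumerate_nil, List.foldl_nil, hd e, hs]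
  | cons v vs ih =>
    intro s d hdrop hlen hd e
    have hs : s < values.length := by
      simp only [List.length_cons] at hlen; omega
    have hv : pvV values s = v := by
      unfold pvV
      rw [List.getD_eq_getElem _ _ hs]
      have h0 : (values.drop s)[0]'(by rw [hdrop]; simp) = v := by
        simp [hdrop]
      rw [List.getElem_drop] at h0
      simpa using h0
    rw [PySem.List.enumerate_cons, List.foldl_cons]
    have hstep := pvIStep_row values s v [] d (by intro e'; simpa using hd e')
    have hnext : ∀ e', PySem.Dict.get? (v.foldl (pvIStep (s : Int)) d) e'
        = pvOptL (pvIdx values e' (s + 1)) := by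
      intro e'
      have := hstep e'
      rw [List.nil_append] at this
      rw [this, pvIdx_succ, hv]
    have hdrop' : values.drop (s + 1) = vs := by
      have : values.drop (s + 1) = (values.drop s).drop 1 := by rw [List.drop_drop]
      rw [this, hdrop, List.drop_one, List.tail_cons]
    have hcast : (s : Int) + 1 = ((s + 1 : Nat) : Int) := by push_cast; ring
    rw [hcast]
    exact ih (s + 1) _ hdrop' (by simp only [List.length_cons] at hlen; omega) hnext e

lemma pvInv_spec (values : List (List String)) :
    ∀ e, PySem.Dict.get? (pvInv values) e = pvOptL (pvIdx values e values.length) := by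
  intro e
  have h := pvInv_fold values values 0 PySem.Dict.empty (by simp) (by simp)
    (fun e' => by simp [pvIdx, pvOptL])
  have h0 : ((0 : Nat) : Int) = (0 : Int) := rfl
  rw [h0] at h
  exact h e

lemma pvInv_getD (values : List (List String)) (e : String) :
    PySem.Dict.getD (pvInv values) e [] = pvIdx values e values.length := by
  show (PySem.Dict.get? (pvInv values) e).getD [] = _
  rw [pvInv_spec]
  unfold pvOptL
  split_ifs with h
  · rw [h]; rfl
  · rfl

-- the multiset of partner-row events of a row with value lst
def pvJs (values : List (List String)) (lst : List String) : List Int :=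
  (PySem.List.dedup lst).flatMap (fun e =>
    (pvIdx values e values.length).filter (fun j => decide (PySem.List.pyGetD values j [] ≠ lst)))

lemma pvCnt_eq (values : List (List String)) (lst : List String) :
    pvCnt values (pvInv values) lst = PySem.Dict.counter (pvJs values lst) := by
  unfold pvCnt pvJs
  rw [← PySem.Dict.foldl_insert_getD_add_one_eq_counter, List.foldl_flatMap]
  apply PySem.List.foldl_congr_mem
  intro cnt e _
  rw [pvInv_getD]
  exact PySem.List.foldl_ite_eq_foldl_filter _ _ _ _

lemma pvCnt_values (values : List (List String)) (lst : List String) :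
    PySem.Dict.values (pvCnt values (pvInv values) lst)
      = (PySem.Set.ofList (pvJs values lst)).map (fun q => (((pvJs values lst).count q : Nat) : Int)) := by
  rw [pvCnt_eq]
  have hv : PySem.Dict.values (PySem.Dict.counter (pvJs values lst))
      = (PySem.Dict.counter (pvJs values lst)).items.map (·.2) := rfl
  rw [hv, PySem.Dict.items_counter, List.map_map]
  rfl

lemma pv_sum_indicator (l : List String) (q : String → Bool) :
    (l.map (fun e => if q e then (1 : Nat) else 0)).sum = l.countP q := by
  induction l with
  | nil => rfl
  | cons x t ih => by_cases h : q x <;> simp [h, ih, Nat.add_comm]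

lemma pvInterC_countP (a b : List String) :
    pvInterC a b = ((PySem.List.dedup a).countP (fun e => decide (e ∈ b)) : Int) := by
  unfold pvInterC
  show ((List.filter (fun x => PySem.Set.contains (PySem.Set.ofList b) x) (PySem.Set.ofList a)).length : Int) = _
  rw [← List.countP_eq_length_filter]
  congr 1
  have : PySem.List.dedup a = PySem.Set.ofList a := rfl
  rw [this]
  apply List.countP_congr
  intro x _
  rw [PySem.Set.contains_iff, PySem.Set.mem_ofList]
  simp

lemma pvJs_count (values : List (List String)) (lst : List String) (j : Nat)
    (hj : j < values.length) (hcond : pvV values j ≠ lst) :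
    (((pvJs values lst).count ((j : Nat) : Int) : Nat) : Int) = pvInterC lst (pvV values j) := by
  unfold pvJs
  rw [List.count_flatMap]
  have hterm : ∀ e ∈ PySem.List.dedup lst,
      (List.count ((j : Nat) : Int) ∘ fun e =>
        (pvIdx values e values.length).filter (fun j => decide (PySem.List.pyGetD values j [] ≠ lst))) e
      = (if decide (e ∈ pvV values j) then (1 : Nat) else 0) := by
    intro e _
    show List.count ((j : Nat) : Int)
        ((pvIdx values e values.length).filter (fun j => decide (PySem.List.pyGetD values j [] ≠ lst))) = _
    rw [List.count_filter (by
      simp only [PySem.List.pyGetD_natCast]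
      exact decide_eq_true hcond)]
    unfold pvIdx
    rw [List.count_map_of_injective _ _ Nat.cast_injective]
    by_cases hmem : j ∈ (List.range values.length).filter (fun i => decide (e ∈ pvV values i))
    · rw [List.count_eq_one_of_mem ((List.nodup_range).filter _) hmem]
      have := (List.mem_filter.1 hmem).2
      rw [if_pos this]
    · rw [List.count_eq_zero_of_not_mem hmem, if_neg]
      intro hc
      exact hmem (List.mem_filter.2 ⟨List.mem_range.2 hj, hc⟩)
  rw [List.map_congr_left hterm, pv_sum_indicator, pvInterC_countP]

lemma pvJs_mem (values : List (List String)) (lst : List String) (q : Int) :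
    q ∈ pvJs values lst ↔ ∃ j : Nat, j < values.length ∧ q = (j : Int) ∧ pvV values j ≠ lst
      ∧ ∃ e ∈ lst, e ∈ pvV values j := by
  constructor
  · intro hq
    obtain ⟨e, he, hq'⟩ := List.mem_flatMap.1 hq
    obtain ⟨hidx, hcond⟩ := List.mem_filter.1 hq'
    obtain ⟨j, hjf, rfl⟩ := List.mem_map.1 hidx
    obtain ⟨hjr, hje⟩ := List.mem_filter.1 hjf
    have hjn := List.mem_range.1 hjr
    refine ⟨j, hjn, rfl, ?_, e, (PySem.List.mem_dedup lst e).1 he, of_decide_eq_true hje⟩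
    rw [PySem.List.pyGetD_natCast] at hcond
    exact of_decide_eq_true hcond
  · rintro ⟨j, hjn, rfl, hcond, e, helst, hej⟩
    apply List.mem_flatMap.2
    refine ⟨e, (PySem.List.mem_dedup lst e).2 helst, List.mem_filter.2 ⟨?_, ?_⟩⟩
    · unfold pvIdx
      exact List.mem_map.2 ⟨j, List.mem_filter.2 ⟨List.mem_range.2 hjn, decide_eq_true hej⟩, rfl⟩
    · rw [PySem.List.pyGetD_natCast]
      exact decide_eq_true hcond

-- running maximum with base 0
def pvMaxL (L : List Int) : Int := L.foldl max 0

lemma pvMaxL_le (L : List Int) : ∀ x ∈ L, x ≤ pvMaxL L := (PySem.List.le_foldl_max L 0).2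

lemma pvMaxL_nonneg (L : List Int) : 0 ≤ pvMaxL L := (PySem.List.le_foldl_max L 0).1

lemma pvMaxL_eq_of (L1 L2 : List Int) (h1 : ∀ x ∈ L1, x ≤ pvMaxL L2)
    (h2 : ∀ x ∈ L2, x ≤ pvMaxL L1) : pvMaxL L1 = pvMaxL L2 := by
  apply le_antisymm
  · rcases PySem.List.foldl_max_mem L1 0 with h | h
    · rw [pvMaxL, h]; exact pvMaxL_nonneg L2
    · exact h1 _ h
  · rcases PySem.List.foldl_max_mem L2 0 with h | h
    · rw [pvMaxL, h]; exact pvMaxL_nonneg L1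
    · exact h2 _ h

lemma pv_fold_ifmax (L : List Int) :
    L.foldl (fun m c => if c > m then c else m) 0 = pvMaxL L := by
  apply PySem.List.foldl_congr_mem
  intro m c _
  rcases lt_or_ge m c with h | h
  · rw [if_pos h, max_eq_right (le_of_lt h)]
  · rw [if_neg (not_lt.2 h), max_eq_left h]

lemma pvF_as_max (values : List (List String)) (k n : Nat) :
    pvF values k n = pvMaxL (((List.range n).filter (fun j => decide (pvV values j ≠ pvV values k))).map
      (fun j => pvInterC (pvV values k) (pvV values j))) := by
  unfold pvF pvMaxL
  rw [List.foldl_map,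
    ← PySem.List.foldl_ite_eq_foldl_filter (p := fun j => pvV values j ≠ pvV values k)
      (f := fun m j => max m (pvInterC (pvV values k) (pvV values j)))]
  rfl

lemma pvInterC_pos (a b : List String) (h : 0 < pvInterC a b) : ∃ e ∈ a, e ∈ b := by
  rw [pvInterC_countP] at h
  have h' : 0 < (PySem.List.dedup a).countP (fun e => decide (e ∈ b)) := by exact_mod_cast h
  obtain ⟨e, he, hq⟩ := List.countP_pos_iff.1 h'
  exact ⟨e, (PySem.List.mem_dedup a e).1 he, of_decide_eq_true hq⟩

lemma pvB_row (values : List (List String)) (k : Nat) :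
    pvMaxL (PySem.Dict.values (pvCnt values (pvInv values) (pvV values k))) = pvF values k values.length := by
  rw [pvCnt_values, pvF_as_max]
  apply pvMaxL_eq_of
  · intro x hx
    obtain ⟨q, hq, rfl⟩ := List.mem_map.1 hx
    have hq' : q ∈ pvJs values (pvV values k) := (PySem.Set.mem_ofList _ _).1 hq
    obtain ⟨j, hjn, rfl, hcond, _e, _helst, _hej⟩ := (pvJs_mem values (pvV values k) q).1 hq'
    rw [pvJs_count values (pvV values k) j hjn hcond]
    have hmemA : pvInterC (pvV values k) (pvV values j)
        ∈ ((List.range values.length).filter (fun j => decide (pvV values j ≠ pvV values k))).map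
          (fun j => pvInterC (pvV values k) (pvV values j)) :=
      List.mem_map.2 ⟨j, List.mem_filter.2 ⟨List.mem_range.2 hjn, decide_eq_true hcond⟩, rfl⟩
    exact pvMaxL_le _ _ hmemA
  · intro x hx
    obtain ⟨j, hjf, rfl⟩ := List.mem_map.1 hx
    obtain ⟨hjr, hcondb⟩ := List.mem_filter.1 hjf
    have hjn := List.mem_range.1 hjr
    have hcond : pvV values j ≠ pvV values k := of_decide_eq_true hcondb
    rcases lt_or_ge 0 (pvInterC (pvV values k) (pvV values j)) with hpos | hle
    case inr => exact le_trans hle (pvMaxL_nonneg _)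
    obtain ⟨e, he1, he2⟩ := pvInterC_pos _ _ hpos
    have hqmem : ((j : Nat) : Int) ∈ pvJs values (pvV values k) :=
      (pvJs_mem values (pvV values k) _).2 ⟨j, hjn, rfl, hcond, e, he1, he2⟩
    have hmemB : (((pvJs values (pvV values k)).count ((j : Nat) : Int) : Nat) : Int)
        ∈ (PySem.Set.ofList (pvJs values (pvV values k))).map
          (fun q => (((pvJs values (pvV values k)).count q : Nat) : Int)) :=
      List.mem_map.2 ⟨((j : Nat) : Int), (PySem.Set.mem_ofList _ _).2 hqmem, rfl⟩
    have hcnt := pvJs_count values (pvV values k) j hjn hcond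
    calc pvInterC (pvV values k) (pvV values j)
        = (((pvJs values (pvV values k)).count ((j : Nat) : Int) : Nat) : Int) := hcnt.symm
      _ ≤ pvMaxL _ := pvMaxL_le _ _ hmemB

lemma pvBScores_eq (values : List (List String)) : pvBScores values = pvScores values := by
  unfold pvBScores
  rw [PySem.List.foldl_append_singleton_eq_map, List.nil_append]
  apply List.ext_getElem
  · simp [pvScores]
  · intro k hk1 hk2
    have hkn : k < values.length := by simpa using hk1
    simp only [List.getElem_map, pvScores, List.getElem_range]
    have hcurr : values[k] = pvV values k := by
      unfold pvV
      rw [List.getD_eq_getElem _ _ hkn]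
    rw [hcurr, pv_fold_ifmax, pvB_row]

-- ===== A-side lemmas (A's quadratic loop computes pvScores; min+index = first argmin) =====

lemma pv_interC_raw (a b : List String) :
    PySem.Set.len (PySem.Set.inter (PySem.Set.ofList a) b) = pvInterC a b := by
  have h1 : (PySem.Set.inter (PySem.Set.ofList a) b).Nodup :=
    PySem.Set.nodup_inter _ _ (PySem.Set.nodup_ofList a)
  have h2 : (PySem.Set.inter (PySem.Set.ofList a) (PySem.Set.ofList b)).Nodup :=
    PySem.Set.nodup_inter _ _ (PySem.Set.nodup_ofList a)
  have hperm : (PySem.Set.inter (PySem.Set.ofList a) b).Perm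
      (PySem.Set.inter (PySem.Set.ofList a) (PySem.Set.ofList b)) := by
    rw [List.perm_ext_iff_of_nodup h1 h2]
    intro x
    simp [PySem.Set.mem_inter, PySem.Set.mem_ofList]
  simp [pvInterC, PySem.Set.len, hperm.length_eq]

lemma pv_interC_comm (a b : List String) : pvInterC a b = pvInterC b a := by
  have h1 : (PySem.Set.inter (PySem.Set.ofList a) (PySem.Set.ofList b)).Nodup :=
    PySem.Set.nodup_inter _ _ (PySem.Set.nodup_ofList a)
  have h2 : (PySem.Set.inter (PySem.Set.ofList b) (PySem.Set.ofList a)).Nodup :=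
    PySem.Set.nodup_inter _ _ (PySem.Set.nodup_ofList b)
  have hperm : (PySem.Set.inter (PySem.Set.ofList a) (PySem.Set.ofList b)).Perm
      (PySem.Set.inter (PySem.Set.ofList b) (PySem.Set.ofList a)) := by
    rw [List.perm_ext_iff_of_nodup h1 h2]
    intro x
    simp [PySem.Set.mem_inter, PySem.Set.mem_ofList]
    tauto
  simp [pvInterC, PySem.Set.len, hperm.length_eq]

lemma pv_foldl_eq_range {α : Type} (L : List α) (d : α) (g : Int → α → Int) :
    ∀ init, L.foldl g init = (List.range L.length).foldl (fun m j => g m (L.getD j d)) init := by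
  induction L with
  | nil => intro init; simp
  | cons x xs ih =>
    intro init
    simp only [List.foldl_cons, List.length_cons, List.range_succ_eq_map, List.foldl_map]
    rw [ih (g init x)]
    rfl

lemma pvA_row (values : List (List String)) (k : Nat) :
    (values.filter (fun i => i != pvV values k)).foldl (fun m next =>
      if PySem.Set.len (PySem.Set.inter (PySem.Set.ofList next) (pvV values k)) > m
      then PySem.Set.len (PySem.Set.inter (PySem.Set.ofList next) (pvV values k)) else m) 0
    = pvF values k values.length := by
  rw [← PySem.List.foldl_if_eq_foldl_filter]
  rw [pv_foldl_eq_range values [] _ 0]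
  unfold pvF
  apply PySem.List.foldl_congr_mem
  intro m j _hj
  by_cases hne : pvV values j = pvV values k
  · have hgd : values.getD j [] = pvV values k := hne
    rw [if_neg (by rw [hgd]; simp), pvStep, if_neg (by rw [hne]; exact fun h => h rfl)]
  · have hb : (values.getD j [] != pvV values k) = true := by
      simp [pvV] at hne ⊢
      exact hne
    rw [if_pos hb, pvStep, if_pos hne]
    have hI : PySem.Set.len (PySem.Set.inter (PySem.Set.ofList (values.getD j [])) (pvV values k))
        = pvInterC (pvV values k) (pvV values j) := by
      rw [pv_interC_raw, pv_interC_comm]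
      rfl
    rw [hI]
    rcases lt_or_ge m (pvInterC (pvV values k) (pvV values j)) with h | h
    · rw [if_pos h, max_eq_right (le_of_lt h)]
    · rw [if_neg (not_lt.2 h), max_eq_left h]

lemma pvA_max_common (values : List (List String)) :
    values.foldl (fun acc curr =>
      acc ++ [(values.filter (fun i => i != curr)).foldl (fun m next =>
        if PySem.Set.len (PySem.Set.inter (PySem.Set.ofList next) curr) > m
        then PySem.Set.len (PySem.Set.inter (PySem.Set.ofList next) curr) else m) 0]) []
      = pvScores values := by
  rw [PySem.List.foldl_append_singleton_eq_map, List.nil_append]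
  apply List.ext_getElem
  · simp [pvScores]
  · intro k hk1 hk2
    have hkn : k < values.length := by simpa using hk1
    simp only [List.getElem_map, pvScores, List.getElem_range]
    have hcurr : values[k] = pvV values k := by
      unfold pvV
      rw [List.getD_eq_getElem _ _ hkn]
    rw [hcurr]
    exact pvA_row values k

-- "b is the first index of a minimal entry among the first k entries of L"
def pvIFA (L : List Int) (k b : Nat) : Prop :=
  b < k ∧ (∀ i, i < k → L.getD b 0 ≤ L.getD i 0) ∧ (∀ i, i < b → L.getD b 0 < L.getD i 0)

lemma pvIFA_unique (L : List Int) (k b b' : Nat) (h : pvIFA L k b) (h' : pvIFA L k b') : b = b' := by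
  obtain ⟨hb, hmin, hfst⟩ := h
  obtain ⟨hb', hmin', hfst'⟩ := h'
  rcases Nat.lt_trichotomy b b' with hlt | heq | hgt
  · exact absurd (hmin b' hb') (not_le.2 (hfst' b hlt))
  · exact heq
  · exact absurd (hmin' b hb) (not_le.2 (hfst b' hgt))

lemma pv_sel_inv (L : List Int) (_hL : 0 < L.length) :
    ∀ (k : Nat), 1 ≤ k → k ≤ L.length →
    ∃ b : Nat, (PySem.List.pyRange 1 (k : Int) 1).foldl
        (fun best i => if PySem.List.pyGetD L i 0 < PySem.List.pyGetD L best 0 then i else best) 0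
      = (b : Int) ∧ pvIFA L k b := by
  intro k
  induction k with
  | zero => intro h; omega
  | succ k ih =>
    intro _h1 hlen
    by_cases hk1 : k = 0
    · subst hk1
      refine ⟨0, ?_, ?_⟩
      · rw [show ((1 : Nat) : Int) = (1 : Int) from rfl,
          PySem.List.pyRange_one_eq_nil (le_refl 1), List.foldl_nil]
        simp
      · refine ⟨Nat.zero_lt_one, ?_, ?_⟩
        · intro i hi
          have : i = 0 := by omega
          subst this
          exact le_refl _
        · intro i hi
          omega
    · have hk : 1 ≤ k := by omega
      obtain ⟨b, hb, hblt, hbmin, hbfst⟩ := ih hk (by omega)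
      have hsplit : PySem.List.pyRange 1 ((k + 1 : Nat) : Int) 1
          = PySem.List.pyRange 1 (k : Int) 1 ++ [(k : Int)] := by
        have h := PySem.List.pyRange_one_succ_right (a := 1) (b := (k : Int)) (by omega)
        rw [← h]
        norm_cast
      rw [hsplit, List.foldl_append, hb, List.foldl_cons, List.foldl_nil]
      simp only [PySem.List.pyGetD_natCast]
      by_cases hlt : L.getD k 0 < L.getD b 0
      · rw [if_pos hlt]
        refine ⟨k, rfl, Nat.lt_succ_self k, ?_, ?_⟩
        · intro i hi
          rcases Nat.lt_or_ge i k with h | h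
          · exact le_of_lt (lt_of_lt_of_le hlt (hbmin i h))
          · have : i = k := by omega
            subst this
            exact le_refl _
        · intro i hi
          exact lt_of_lt_of_le hlt (hbmin i hi)
      · rw [if_neg hlt]
        refine ⟨b, rfl, Nat.lt_succ_of_lt hblt, ?_, hbfst⟩
        intro i hi
        rcases Nat.lt_or_ge i k with h | h
        · exact hbmin i h
        · have : i = k := by omega
          subst this
          exact not_lt.1 hlt

lemma pv_select_eq (values : List (List String)) (L : List Int)
    (hlen : L.length = values.length) (hne : values ≠ []) :
    (match PySem.List.min? L (fun x => x) with
     | none => []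
     | some mn =>
       match PySem.List.index? L mn with
       | none => []
       | some idx => PySem.List.pyGetD values (idx : Int) [])
      = PySem.List.pyGetD values
          ((PySem.List.pyRange 1 (PySem.List.len values) 1).foldl
            (fun best i => if PySem.List.pyGetD L i 0 < PySem.List.pyGetD L best 0 then i else best) 0) [] := by
  have hLpos : 0 < L.length := by
    rw [hlen]
    exact List.length_pos_of_ne_nil hne
  obtain ⟨x, t, rfl⟩ : ∃ x t, L = x :: t := by
    cases L with
    | nil => simp at hLpos
    | cons x t => exact ⟨x, t, rfl⟩
  have hm0mem : t.foldl min x ∈ x :: t := by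
    rcases PySem.List.foldl_min_mem t x with h | h
    · rw [h]; exact List.mem_cons_self
    · exact List.mem_cons_of_mem _ h
  rcases hidx : List.idxOf? (t.foldl min x) (x :: t) with _ | i0
  · rw [List.idxOf?_eq_none_iff] at hidx
    exact absurd hm0mem hidx
  · obtain ⟨hi0len, hi0eq, hi0fst⟩ := List.idxOf?_eq_some_iff.1 hidx
    have hISel : PySem.List.index? (x :: t) (t.foldl min x) = some i0 := hidx
    simp only [PySem.List.min?_id_cons, hISel]
    have hnlen : PySem.List.len values = ((x :: t).length : Int) := by
      rw [PySem.List.len_eq, hlen]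
    rw [hnlen]
    obtain ⟨b, hb, hIFAb⟩ := pv_sel_inv (x :: t) hLpos (x :: t).length (by omega) (le_refl _)
    rw [hb]
    have hIFAi0 : pvIFA (x :: t) (x :: t).length i0 := by
      refine ⟨hi0len, ?_, ?_⟩
      · intro i hi
        rw [List.getD_eq_getElem _ _ hi0len, hi0eq, List.getD_eq_getElem _ _ hi]
        have hmem := List.getElem_mem hi (l := x :: t)
        rcases List.mem_cons.1 hmem with h | h
        · rw [h]
          exact (PySem.List.foldl_min_le t x).1
        · exact (PySem.List.foldl_min_le t x).2 _ h
      · intro i hi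
        have hilen : i < (x :: t).length := Nat.lt_trans hi hi0len
        rw [List.getD_eq_getElem _ _ hi0len, hi0eq, List.getD_eq_getElem _ _ hilen]
        have hle : t.foldl min x ≤ (x :: t)[i] := by
          have hmem := List.getElem_mem hilen (l := x :: t)
          rcases List.mem_cons.1 hmem with h | h
          · rw [h]
            exact (PySem.List.foldl_min_le t x).1
          · exact (PySem.List.foldl_min_le t x).2 _ h
        exact lt_of_le_of_ne hle (fun h => hi0fst i hi h.symm)
    rw [pvIFA_unique (x :: t) (x :: t).length i0 b hIFAi0 hIFAb]

-- ===== VERDICT (by name: the statement is the Claim_ definition above) =====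
theorem find_anomaly_spec : Claim_equal_find_anomaly := by
  intro values _hdom hpre
  unfold Spec_find_anomaly
  show find_anomaly values = find_anomaly_alt values
  have hB : find_anomaly_alt values
      = PySem.List.pyGetD values
          ((PySem.List.pyRange 1 (PySem.List.len values) 1).foldl
            (fun best i => if PySem.List.pyGetD (pvScores values) i 0
              < PySem.List.pyGetD (pvScores values) best 0 then i else best) 0) [] := by
    rw [pvAlt_eq values, pvBScores_eq]
  have hA : find_anomaly values
      = (match PySem.List.min? (pvScores values) (fun x => x) with
         | none => []
         | some mn =>
           match PySem.List.index? (pvScores values) mn with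
           | none => []
           | some idx => PySem.List.pyGetD values (idx : Int) []) := by
    show (match PySem.List.min? (values.foldl (fun acc curr =>
      acc ++ [(values.filter (fun i => i != curr)).foldl (fun m next =>
        if PySem.Set.len (PySem.Set.inter (PySem.Set.ofList next) curr) > m
        then PySem.Set.len (PySem.Set.inter (PySem.Set.ofList next) curr) else m) 0]) []) (fun x => x) with
      | none => ([] : List String)
      | some mn =>
        match PySem.List.index? (values.foldl (fun acc curr =>
          acc ++ [(values.filter (fun i => i != curr)).foldl (fun m next =>
            if PySem.Set.len (PySem.Set.inter (PySem.Set.ofList next) curr) > m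
            then PySem.Set.len (PySem.Set.inter (PySem.Set.ofList next) curr) else m) 0]) []) mn with
        | none => []
        | some idx => PySem.List.pyGetD values (idx : Int) []) = _
    rw [pvA_max_common]
  rw [hA, hB]
  exact pv_select_eq values (pvScores values) (by simp [pvScores]) hpre
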